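-- pv_equiv track=rewrite | github.com/XHermitOne/iq_framework | iq/components/virtual_excel/v_ods.py | setNumberFormat
-- ===== SOURCE A (Python) =====
-- def setNumberFormat(data_dict):
--     """
--     Заполнить формат числового представления.
--
--     :param data_dict: Словарь данных.
--     """
--     number_format = {}
--     format = data_dict.get('Format', '0')
--
--     # Не анализировать знак %
--     format = format.replace('%', '')
--     decimalplaces = len(format[format.find(',')+1:]) if format.find(',') >= 0 else 0
--     minintegerdigits = len([i for i in list(format[:format.find(',')]) if i == '0']) if format.find(',') >= 0 else len([i for i in list(format) if i == '0'])
--     grouping = 'true' if format.find(' ') >= 0 else 'false'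
--
--     number_format['decimalplaces'] = str(decimalplaces)
--     number_format['minintegerdigits'] = str(minintegerdigits)
--     number_format['grouping'] = str(grouping)
--
--     # log.debug(u'Установка числового формата <%s>' % number_format)
--     return number_format
-- ===== SOURCE B (Python) =====
-- def setNumberFormat(data_dict):
--     fmt = data_dict.get('Format', '0').replace('%', '')
--     seen_comma = False
--     decimalplaces = 0
--     minintegerdigits = 0
--     grouping = 'false'
--     for ch in fmt:
--         if seen_comma:
--             decimalplaces += 1
--         elif ch == ',':
--             seen_comma = True
--         elif ch == '0':
--             minintegerdigits += 1
--         if ch == ' ':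
--             grouping = 'true'
--     return {'decimalplaces': str(decimalplaces),
--             'minintegerdigits': str(minintegerdigits),
--             'grouping': grouping}
-- ===== Notes on version B (the rewrite author's own statement) =====
-- stated objective: alternative
-- what changed: Replaced the find/slice/list-comprehension multi-pass over the format string with a single stateful loop (seen-comma flag) that counts integer zeros, post-comma characters and detects spaces in one traversal.
import Mathlib
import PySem

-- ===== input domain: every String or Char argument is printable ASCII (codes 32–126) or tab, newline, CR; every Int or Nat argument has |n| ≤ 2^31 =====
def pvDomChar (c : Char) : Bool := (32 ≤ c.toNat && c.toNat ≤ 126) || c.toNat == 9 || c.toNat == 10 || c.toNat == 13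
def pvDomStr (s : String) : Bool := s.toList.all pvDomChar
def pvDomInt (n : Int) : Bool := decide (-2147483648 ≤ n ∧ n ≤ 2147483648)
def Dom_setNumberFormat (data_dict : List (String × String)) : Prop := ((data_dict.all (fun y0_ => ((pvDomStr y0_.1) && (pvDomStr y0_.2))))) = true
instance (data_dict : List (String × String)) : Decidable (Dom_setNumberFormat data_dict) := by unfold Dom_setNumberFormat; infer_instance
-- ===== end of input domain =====

-- B replaces A's find/slice/comprehension multi-pass with one stateful single-pass loop; same results everywhere (objective: alternative decomposition).

-- ===== PORT A =====
def setNumberFormat (data_dict : List (String × String)) : List (String × String) :=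
  let format0 := (PySem.Dict.mk data_dict).getD "Format" "0"
  let format := PySem.Str.replace format0 "%" ""
  let f := PySem.Str.find format ","
  let decimalplaces : Int :=
    if 0 ≤ f then PySem.Str.len (PySem.Str.slice format (some (f + 1)) none) else 0
  let minintegerdigits : Int :=
    if 0 ≤ f then
      (((PySem.Str.slice format none (some f)).toList.filter (fun i => i == '0')).length : Int)
    else ((format.toList.filter (fun i => i == '0')).length : Int)
  let grouping : String := if 0 ≤ PySem.Str.find format " " then "true" else "false"
  ((((PySem.Dict.empty : PySem.Dict String String).insert "decimalplaces" (PySem.Int.toStr decimalplaces)).insert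
      "minintegerdigits" (PySem.Int.toStr minintegerdigits)).insert "grouping" grouping).items

-- ===== PORT B =====
-- the single for-loop of Source B: state (seen_comma, decimalplaces, minintegerdigits, grouping)
def bLoop : List Char → Bool → Nat → Nat → String → Bool × Nat × Nat × String
  | [], seen, dec, mi, gr => (seen, dec, mi, gr)
  | ch :: rest, seen, dec, mi, gr =>
    if seen then bLoop rest seen (dec + 1) mi (if ch = ' ' then "true" else gr)
    else if ch = ',' then bLoop rest true dec mi (if ch = ' ' then "true" else gr)
    else if ch = '0' then bLoop rest seen dec (mi + 1) (if ch = ' ' then "true" else gr)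
    else bLoop rest seen dec mi (if ch = ' ' then "true" else gr)

def setNumberFormat_alt (data_dict : List (String × String)) : List (String × String) :=
  let fmt := PySem.Str.replace ((PySem.Dict.mk data_dict).getD "Format" "0") "%" ""
  let r := bLoop fmt.toList false 0 0 "false"
  (PySem.Dict.ofList
    [("decimalplaces", PySem.Int.toStr (r.2.1 : Int)),
     ("minintegerdigits", PySem.Int.toStr (r.2.2.1 : Int)),
     ("grouping", r.2.2.2)]).items

-- ===== PRECONDITION & SPEC =====
def Spec_setNumberFormat (data_dict : List (String × String)) (out : List (String × String)) : Prop := out = setNumberFormat_alt data_dict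
instance (data_dict : List (String × String)) (out : List (String × String)) : Decidable (Spec_setNumberFormat data_dict out) := by unfold Spec_setNumberFormat; infer_instance

-- ===== CLAIM (what is proved, stated in full; the proofs are below) =====
def Claim_equal_setNumberFormat : Prop := ∀ (data_dict : List (String × String)), Dom_setNumberFormat data_dict → Spec_setNumberFormat data_dict (setNumberFormat data_dict)

-- ===== LEMMAS AND PROOFS =====

-- decompose a list at the FIRST occurrence of c
theorem pv_first_split {c : Char} {l : List Char} (h : c ∈ l) :
    ∃ l1 l2, l = l1 ++ c :: l2 ∧ c ∉ l1 := by
  induction l with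
  | nil => cases h
  | cons a t ih =>
    by_cases hac : a = c
    · exact ⟨[], t, by simp [hac], by simp⟩
    · have hct : c ∈ t := by
        rcases List.mem_cons.mp h with h' | h'
        · exact absurd h'.symm hac
        · exact h'
      obtain ⟨l1, l2, he, hn⟩ := ih hct
      exact ⟨a :: l1, l2, by simp [he], by
        simp only [List.mem_cons, not_or]
        exact ⟨fun h' => hac h'.symm, hn⟩⟩

theorem pv_find_not_mem {c : Char} {s : List Char} (h : c ∉ s) :
    PySem.Chars.find s [c] = -1 := by
  refine (PySem.Chars.find_eq_neg_one_iff s [c]).mpr (fun hinf => h (hinf.subset (by simp)))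

theorem pv_find_singleton (l1 l2 : List Char) (c : Char) (h : c ∉ l1) :
    PySem.Chars.find (l1 ++ c :: l2) [c] = (l1.length : Int) := by
  have hinf : [c] <:+: (l1 ++ c :: l2) := ⟨l1, l2, by simp⟩
  have hnn : 0 ≤ PySem.Chars.find (l1 ++ c :: l2) [c] :=
    (PySem.Chars.find_nonneg_iff _ _).mpr hinf
  obtain ⟨hpre, hmin⟩ := PySem.Chars.find_spec hnn
  set j := (PySem.Chars.find (l1 ++ c :: l2) [c]).toNat with hj
  have hjeq : j = l1.length := by
    rcases Nat.lt_trichotomy j l1.length with hlt | heq | hgt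
    · exfalso
      obtain ⟨t, ht⟩ := hpre
      have hdrop : List.drop j (l1 ++ c :: l2) = List.drop j l1 ++ c :: l2 :=
        List.drop_append_of_le_length (Nat.le_of_lt hlt)
      have hl1 : List.drop j l1 = l1[j] :: List.drop (j + 1) l1 :=
        List.drop_eq_getElem_cons hlt
      have : c = l1[j] := by
        rw [hdrop, hl1] at ht
        simp only [List.singleton_append] at ht
        exact (List.cons_eq_cons.mp ht).1
      exact h (this ▸ List.getElem_mem hlt)
    · exact heq
    · exfalso
      exact hmin l1.length hgt ⟨l2, by simp⟩
  omega

theorem pv_bLoop_seen (xs : List Char) (dec mi : Nat) (gr : String) :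
    bLoop xs true dec mi gr = (true, dec + xs.length, mi, if ' ' ∈ xs then "true" else gr) := by
  induction xs generalizing dec gr with
  | nil => simp [bLoop]
  | cons ch rest ih =>
    simp only [bLoop, if_true, ih, List.length_cons, List.mem_cons, Prod.mk.injEq]
    refine ⟨trivial, by omega, trivial, ?_⟩
    by_cases h1 : ' ' ∈ rest <;> by_cases h2 : ch = ' ' <;>
      simp [h1, h2, eq_comm]

theorem pv_bLoop_nocomma (xs : List Char) (h : ',' ∉ xs) (dec mi : Nat) (gr : String) :
    bLoop xs false dec mi gr =
      (false, dec, mi + (xs.filter (fun i => i == '0')).length, if ' ' ∈ xs then "true" else gr) := by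
  induction xs generalizing dec mi gr with
  | nil => simp [bLoop]
  | cons ch rest ih =>
    simp only [List.mem_cons, not_or] at h
    obtain ⟨hch, hrest⟩ := h
    have hch' : ¬ ch = ',' := fun h' => hch h'.symm
    by_cases h0 : ch = '0'
    · simp only [bLoop, if_neg Bool.false_ne_true, if_neg hch', if_pos h0, ih hrest, Prod.mk.injEq]
      refine ⟨trivial, trivial, ?_, ?_⟩
      · simp [h0]; omega
      · by_cases h1 : ' ' ∈ rest <;> by_cases h2 : ch = ' ' <;>
          simp [h1, h2, eq_comm]
    · simp only [bLoop, if_neg Bool.false_ne_true, if_neg hch', if_neg h0, ih hrest, Prod.mk.injEq]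
      refine ⟨trivial, trivial, ?_, ?_⟩
      · simp [h0]
      · by_cases h1 : ' ' ∈ rest <;> by_cases h2 : ch = ' ' <;>
          simp [h1, h2, eq_comm]


theorem pv_bLoop_append (xs ys : List Char) (seen : Bool) (dec mi : Nat) (gr : String) :
    bLoop (xs ++ ys) seen dec mi gr =
      bLoop ys (bLoop xs seen dec mi gr).1 (bLoop xs seen dec mi gr).2.1
        (bLoop xs seen dec mi gr).2.2.1 (bLoop xs seen dec mi gr).2.2.2 := by
  induction xs generalizing seen dec mi gr with
  | nil => simp [bLoop]
  | cons ch rest ih =>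
    simp only [List.cons_append, bLoop]
    split_ifs <;> apply ih

theorem pv_mem_infix {c : Char} {s : List Char} (h : c ∈ s) : [c] <:+: s := by
  obtain ⟨a, b, rfl⟩ := List.append_of_mem h
  exact ⟨a, b, by simp⟩

theorem pv_gr (cs : List Char) :
    (if (0 : Int) ≤ PySem.Chars.find cs [' '] then "true" else "false")
      = (if ' ' ∈ cs then "true" else "false") := by
  by_cases h : ' ' ∈ cs
  · rw [if_pos ((PySem.Chars.find_nonneg_iff _ _).mpr (pv_mem_infix h)), if_pos h]
  · rw [pv_find_not_mem h, if_neg (by norm_num), if_neg h]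

theorem pv_vals (cs : List Char) :
    (if (0 : Int) ≤ PySem.Chars.find cs [','] then
        ((PySem.List.slice cs (some (PySem.Chars.find cs [','] + 1)) none).length : Int)
      else 0) = ((bLoop cs false 0 0 "false").2.1 : Int)
  ∧ (if (0 : Int) ≤ PySem.Chars.find cs [','] then
        (((PySem.List.slice cs none (some (PySem.Chars.find cs [',']))).filter (fun i => i == '0')).length : Int)
      else ((cs.filter (fun i => i == '0')).length : Int)) = ((bLoop cs false 0 0 "false").2.2.1 : Int)
  ∧ (if (0 : Int) ≤ PySem.Chars.find cs [' '] then "true" else "false")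
      = (bLoop cs false 0 0 "false").2.2.2 := by
  by_cases hmem : ',' ∈ cs
  · obtain ⟨l1, l2, rfl, hn1⟩ := pv_first_split hmem
    have hf : PySem.Chars.find (l1 ++ ',' :: l2) [','] = (l1.length : Int) :=
      pv_find_singleton l1 l2 ',' hn1
    have hr : bLoop (l1 ++ ',' :: l2) false 0 0 "false"
        = (true, l2.length, (l1.filter (fun i => i == '0')).length,
            if ' ' ∈ l2 then "true" else if ' ' ∈ l1 then "true" else "false") := by
      rw [pv_bLoop_append, pv_bLoop_nocomma l1 hn1]
      simp only [bLoop, if_neg Bool.false_ne_true, if_neg (by decide : ¬ (',' = ' ')),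
        pv_bLoop_seen]
      simp
    have hpos : (0 : Int) ≤ PySem.Chars.find (l1 ++ ',' :: l2) [','] := by
      rw [hf]; exact Int.natCast_nonneg _
    refine ⟨?_, ?_, ?_⟩
    · rw [if_pos hpos, hf, hr]
      rw [show (l1.length : Int) + 1 = ((l1.length + 1 : Nat) : Int) by push_cast; ring,
        PySem.List.slice_from_natCast,
        show l1 ++ ',' :: l2 = (l1 ++ [',']) ++ l2 by simp,
        List.drop_left' (by simp)]
    · rw [if_pos hpos, hf, hr, PySem.List.slice_to_natCast, List.take_left]
    · rw [pv_gr, hr]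
      have hsp : (' ' ∈ l1 ++ ',' :: l2) ↔ (' ' ∈ l1 ∨ ' ' ∈ l2) := by
        simp [List.mem_append]
      by_cases h1 : ' ' ∈ l1 <;> by_cases h2 : ' ' ∈ l2 <;> simp [hsp, h1, h2]
  · have hf : PySem.Chars.find cs [','] = -1 := pv_find_not_mem hmem
    have hr := pv_bLoop_nocomma cs hmem 0 0 "false"
    refine ⟨?_, ?_, ?_⟩
    · rw [hf, if_neg (by norm_num), hr]; simp
    · rw [hf, if_neg (by norm_num), hr]; simp
    · rw [pv_gr, hr]

theorem pv_items (v1 v2 v3 : String) :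
    ((((PySem.Dict.empty : PySem.Dict String String).insert "decimalplaces" v1).insert
        "minintegerdigits" v2).insert "grouping" v3).items
      = (PySem.Dict.ofList
          [("decimalplaces", v1), ("minintegerdigits", v2), ("grouping", v3)]).items := by
  rfl

-- ===== VERDICT (by name: the statement is the Claim_ definition above) =====
theorem setNumberFormat_spec : Claim_equal_setNumberFormat := by
  intro dd _
  unfold Spec_setNumberFormat setNumberFormat setNumberFormat_alt
  simp only [PySem.Str.find_eq, PySem.Str.len_eq, PySem.Str.toList_slice,
    PySem.Chars.slice_eq_listSlice,
    show ("," : String).toList = [','] from rfl,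
    show (" " : String).toList = [' '] from rfl]
  generalize (PySem.Str.replace ((PySem.Dict.mk dd).getD "Format" "0") "%" "").toList = cs
  obtain ⟨h1, h2, h3⟩ := pv_vals cs
  rw [h1, h2, h3, pv_items]
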